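-- pv_equiv track=rewrite | github.com/Betabravah/A2SV | 2600-k-items-with-the-maximum-sum/2600-k-items-with-the-maximum-sum.py | kItemsWithMaximumSum
-- ===== SOURCE A (Python) =====
-- def kItemsWithMaximumSum(numOnes: int, numZeros: int, numNegOnes: int, k: int) -> int:
--     total = ctr = 0
--     nums = [numOnes, numZeros, numNegOnes]
--
--     for i in range(len(nums)):
--
--         if i == 0:
--                 j = 1
--         elif i == 1:
--             j = 0
--         else:
--             j = -1
--
--         total += nums[i] * j
--         ctr += nums[i]
--
--         if ctr >= k:
--             temp = ctr - k
--
--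
--
--
--             total -= j * temp
--             return total
--
--
--
--
--     return total
-- ===== SOURCE B (Python) =====
-- def kItemsWithMaximumSum(numOnes: int, numZeros: int, numNegOnes: int, k: int) -> int:
--     # Closed-form: take min(k, ones) ones, then zeros, then forced -1s.
--     if numOnes >= k:
--         return k
--     if numOnes + numZeros >= k:
--         return numOnes
--     if numOnes + numZeros + numNegOnes >= k:
--         return 2 * numOnes + numZeros - k
--     return numOnes - numNegOnes
-- ===== Notes on version B (the rewrite author's own statement) =====
-- stated objective: simpler
-- what changed: Replaced the loop over [ones,zeros,negones] with running total/counter accumulators and an early return by a loop-free chain of closed-form arithmetic expressions.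
import Mathlib
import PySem

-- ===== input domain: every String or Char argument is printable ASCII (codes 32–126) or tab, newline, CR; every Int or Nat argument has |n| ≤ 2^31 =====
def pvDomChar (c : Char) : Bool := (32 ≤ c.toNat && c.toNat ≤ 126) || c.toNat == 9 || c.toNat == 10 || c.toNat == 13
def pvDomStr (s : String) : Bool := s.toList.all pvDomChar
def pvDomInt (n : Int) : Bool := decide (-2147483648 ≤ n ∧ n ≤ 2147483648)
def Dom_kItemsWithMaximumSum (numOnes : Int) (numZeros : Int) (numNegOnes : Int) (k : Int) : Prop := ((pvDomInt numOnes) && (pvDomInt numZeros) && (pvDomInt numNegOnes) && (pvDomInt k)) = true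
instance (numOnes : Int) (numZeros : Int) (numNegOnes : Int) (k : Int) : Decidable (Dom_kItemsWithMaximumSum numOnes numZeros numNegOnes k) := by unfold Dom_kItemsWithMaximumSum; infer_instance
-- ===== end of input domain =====

-- B replaces A's accumulator loop with a loop-free chain of closed-form expressions (objective: simpler).

-- ===== PORT A =====
-- the for-loop body with early return: state (total, ctr), iterating the remaining indices
def kItemsLoopA (nums : List Int) (k : Int) : List Int → Int → Int → Int
  | [], total, _ => total
  | i :: rest, total, ctr =>
    let j : Int := if i = 0 then 1 else if i = 1 then 0 else -1
    let v : Int := (PySem.List.pyGet? nums i).getD 0   -- nums[i]; always in range for the indices produced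
    let total := total + v * j
    let ctr := ctr + v
    if ctr ≥ k then
      let temp := ctr - k
      total - j * temp
    else
      kItemsLoopA nums k rest total ctr

def kItemsWithMaximumSum (numOnes : Int) (numZeros : Int) (numNegOnes : Int) (k : Int) : Int :=
  let nums : List Int := [numOnes, numZeros, numNegOnes]
  kItemsLoopA nums k (PySem.List.pyRange 0 (Int.ofNat nums.length) 1) 0 0

-- ===== PORT B =====
def kItemsWithMaximumSum_alt (numOnes : Int) (numZeros : Int) (numNegOnes : Int) (k : Int) : Int :=
  if numOnes ≥ k then k
  else if numOnes + numZeros ≥ k then numOnes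
  else if numOnes + numZeros + numNegOnes ≥ k then 2 * numOnes + numZeros - k
  else numOnes - numNegOnes

-- ===== PRECONDITION & SPEC =====
def Spec_kItemsWithMaximumSum (numOnes : Int) (numZeros : Int) (numNegOnes : Int) (k : Int) (out : Int) : Prop := out = kItemsWithMaximumSum_alt numOnes numZeros numNegOnes k
instance (numOnes : Int) (numZeros : Int) (numNegOnes : Int) (k : Int) (out : Int) : Decidable (Spec_kItemsWithMaximumSum numOnes numZeros numNegOnes k out) := by unfold Spec_kItemsWithMaximumSum; infer_instance

-- ===== CLAIM (what is proved, stated in full; the proofs are below) =====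
def Claim_equal_kItemsWithMaximumSum : Prop := ∀ (numOnes : Int) (numZeros : Int) (numNegOnes : Int) (k : Int), Dom_kItemsWithMaximumSum numOnes numZeros numNegOnes k → Spec_kItemsWithMaximumSum numOnes numZeros numNegOnes k (kItemsWithMaximumSum numOnes numZeros numNegOnes k)

-- ===== LEMMAS AND PROOFS =====
theorem kItems_eval (a b c k : Int) :
    kItemsWithMaximumSum a b c k =
      kItemsLoopA [a, b, c] k [0, 1, 2] 0 0 := by
  have hl : Int.ofNat ([a, b, c] : List Int).length = 3 := rfl
  have h : PySem.List.pyRange 0 3 1 = [0, 1, 2] := by decide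
  simp only [kItemsWithMaximumSum, hl, h]

-- ===== VERDICT (by name: the statement is the Claim_ definition above) =====
theorem kItemsWithMaximumSum_spec : Claim_equal_kItemsWithMaximumSum := by
  intro a b c k _
  show kItemsWithMaximumSum a b c k = kItemsWithMaximumSum_alt a b c k
  rw [kItems_eval]
  simp only [kItemsLoopA, kItemsWithMaximumSum_alt, PySem.List.pyGet?, PySem.List.pyIdx?]
  norm_num [show ((2:Int).toNat) = 2 from rfl, show ((1:Int).toNat) = 1 from rfl,
    show ((0:Int).toNat) = 0 from rfl]
  split_ifs <;> omega
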